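-- pv_equiv track=rewrite | github.com/cirosantilli/project-euler-solvers | solvers/126.py | hull_volume
-- ===== SOURCE A (Python) =====
-- def hull_volume(x: int, y: int, z: int, layers: int) -> int:
--     result = 2 * (x * y + y * z + z * x)
--     if layers == 1:
--         return result
--     increment = 4 * (x + y + z)
--     for _ in range(2, layers + 1):
--         result += increment
--         increment += 8
--     return result
-- ===== SOURCE B (Python) =====
-- def hull_volume(x: int, y: int, z: int, layers: int) -> int:
--     n = max(layers - 1, 0)
--     return 2 * (x * y + y * z + z * x) + 4 * n * (x + y + z) + 4 * n * (n - 1)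
-- ===== Notes on version B (the rewrite author's own statement) =====
-- stated objective: faster
-- what changed: Replaced the per-layer accumulation loop by the closed-form arithmetic-series sum 2(xy+yz+zx) + 4n(x+y+z) + 4n(n-1) with n = max(layers-1, 0).
import Mathlib
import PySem

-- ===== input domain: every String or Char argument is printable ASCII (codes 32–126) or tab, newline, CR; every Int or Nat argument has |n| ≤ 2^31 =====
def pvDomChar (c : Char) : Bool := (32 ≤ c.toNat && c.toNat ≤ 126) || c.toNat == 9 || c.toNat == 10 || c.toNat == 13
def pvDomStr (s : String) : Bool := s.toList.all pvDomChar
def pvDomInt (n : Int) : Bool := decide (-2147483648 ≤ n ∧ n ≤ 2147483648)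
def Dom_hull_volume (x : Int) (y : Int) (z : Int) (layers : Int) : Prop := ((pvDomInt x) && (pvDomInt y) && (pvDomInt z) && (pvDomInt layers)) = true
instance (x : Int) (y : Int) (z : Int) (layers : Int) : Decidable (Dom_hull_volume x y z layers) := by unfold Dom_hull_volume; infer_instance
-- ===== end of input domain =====

-- ===== PORT A =====
-- B computes the layer sum in closed form (O(1)) instead of A's per-layer loop.
def hull_volume (x : Int) (y : Int) (z : Int) (layers : Int) : Int :=
  let result := 2 * (x * y + y * z + z * x)
  if layers == 1 then result
  else
    let increment := 4 * (x + y + z)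
    let p := (PySem.List.pyRange 2 (layers + 1) 1).foldl
      (fun (s : Int × Int) _ => (s.1 + s.2, s.2 + 8)) (result, increment)
    p.1

-- ===== PORT B =====
def hull_volume_alt (x : Int) (y : Int) (z : Int) (layers : Int) : Int :=
  let n := max (layers - 1) 0
  2 * (x * y + y * z + z * x) + 4 * n * (x + y + z) + 4 * n * (n - 1)

-- ===== PRECONDITION & SPEC =====
def Spec_hull_volume (x : Int) (y : Int) (z : Int) (layers : Int) (out : Int) : Prop := out = hull_volume_alt x y z layers
instance (x : Int) (y : Int) (z : Int) (layers : Int) (out : Int) : Decidable (Spec_hull_volume x y z layers out) := by unfold Spec_hull_volume; infer_instance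

-- ===== CLAIM (what is proved, stated in full; the proofs are below) =====
def Claim_equal_hull_volume : Prop := ∀ (x : Int) (y : Int) (z : Int) (layers : Int), Dom_hull_volume x y z layers → Spec_hull_volume x y z layers (hull_volume x y z layers)

-- ===== LEMMAS AND PROOFS =====

-- ===== VERDICT (by name: the statement is the Claim_ definition above) =====
theorem loop_closed_form (n : Nat) : ∀ (a r inc : Int),
    ((PySem.List.pyRange a (a + n) 1).foldl
      (fun (s : Int × Int) _ => (s.1 + s.2, s.2 + 8)) (r, inc)).1
    = r + n * inc + 4 * n * (n - 1) := by
  induction n with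
  | zero => intro a r inc; simp [PySem.List.pyRange_one_eq_nil]
  | succ m ih =>
    intro a r inc
    have hlt : a < a + ((m : Int) + 1) := by omega
    rw [show (a + ((m : Nat) + 1 : Nat) : Int) = a + ((m : Int) + 1) by push_cast; ring,
        PySem.List.pyRange_one_cons hlt]
    simp only [List.foldl_cons]
    have : a + ((m : Int) + 1) = (a + 1) + (m : Nat) := by push_cast; ring
    rw [this, ih (a + 1) (r + inc) (inc + 8)]
    push_cast; ring

theorem hull_volume_spec : Claim_equal_hull_volume := by
  intro x y z layers _
  unfold Spec_hull_volume hull_volume hull_volume_alt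
  by_cases h1 : layers = 1
  · simp [h1]
  · simp only [beq_iff_eq, h1, if_false]
    by_cases h2 : layers ≤ 1
    · rw [PySem.List.pyRange_one_eq_nil (by omega)]
      simp only [List.foldl_nil]
      have : max (layers - 1) 0 = 0 := by omega
      rw [this]; ring
    · have hn : layers + 1 = 2 + ((layers - 1).toNat : Int) := by omega
      rw [hn, loop_closed_form]
      have : max (layers - 1) 0 = ((layers - 1).toNat : Int) := by omega
      rw [this]; ring
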